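-- pv_equiv track=rewrite | github.com/emsec/ConFuzz | src/helpers.py | calculate_ultrascale_bbram_crc
-- ===== SOURCE A (Python) =====
-- def calculate_ultrascale_bbram_crc(aes_key_chunks: list[int], control_word: int):
--     """Calculate the CRC value based on the AES key and the control word.
--     On UltraScale(+) devices the CRC value is also written to the BBRAM.
--
--     The function row_crc_calculation stems from the XilsKey library and has been translated with ChatGPT-3.5.
--     The original function can be found here:
--     https://github.com/Xilinx/embeddedsw/blob/master/lib/sw_services/xilskey/src/xilskey_utils.c
--     Commit: 8fca1ac929453ba06613b5417141483b4c2d8cf3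
--     """
--
--     def row_crc_calculation(PrevCRC, Data, Addr):
--         """u32 XilSKey_RowCrcCalculation(u32 PrevCRC, u32 Data, u32 Addr)"""
--
--         REVERSE_POLYNOMIAL = 0x82F63B78
--
--         Crc = PrevCRC
--         Value = Data
--         Row = Addr
--
--         for Index in range(32):
--             if (((Value & 0x1) ^ Crc) & 0x1) != 0:
--                 Crc = (Crc >> 1) ^ REVERSE_POLYNOMIAL
--             else:
--                 Crc = Crc >> 1
--             Value = Value >> 1
--
--         for Index in range(5):
--             if (((Row & 0x1) ^ Crc) & 0x1) != 0:
--                 Crc = (Crc >> 1) ^ REVERSE_POLYNOMIAL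
--             else:
--                 Crc = Crc >> 1
--             Row = Row >> 1
--
--         return Crc
--
--     crc = 0
--
--     crc = row_crc_calculation(crc, control_word, 9)
--     for i in range(8):
--         crc = row_crc_calculation(crc, aes_key_chunks[i], 8 - i)
--
--     return crc
-- ===== SOURCE B (Python) =====
-- def _make_crc32c_table():
--     """256-entry table for the LSB-first CRC step with polynomial 0x82F63B78."""
--     table = []
--     for byte in range(256):
--         c = byte
--         for _ in range(8):
--             if c & 0x1:
--                 c = (c >> 1) ^ 0x82F63B78
--             else:
--                 c = c >> 1
--         table.append(c)
--     return table
--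
--
-- _CRC32C_TABLE = _make_crc32c_table()
--
--
-- def _row_crc(prev_crc, data, addr):
--     """Fold one 32-bit data word byte-by-byte via the table, then the 5 address bits."""
--     crc = prev_crc
--     d = data % 0x100000000
--     for shift in (0, 8, 16, 24):
--         byte = (d >> shift) & 0xFF
--         crc = (crc >> 8) ^ _CRC32C_TABLE[(crc ^ byte) & 0xFF]
--     row = addr
--     for _ in range(5):
--         if ((row & 0x1) ^ crc) & 0x1:
--             crc = (crc >> 1) ^ 0x82F63B78
--         else:
--             crc = crc >> 1
--         row = row >> 1
--     return crc
--
--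
-- def calculate_ultrascale_bbram_crc(aes_key_chunks: list[int], control_word: int):
--     crc = _row_crc(0, control_word, 9)
--     for i in range(8):
--         crc = _row_crc(crc, aes_key_chunks[i], 8 - i)
--     return crc
-- ===== Notes on version B (the rewrite author's own statement) =====
-- stated objective: alternative
-- what changed: Replaces A's 32 per-bit CRC iterations per data word by a precomputed 256-entry CRC-32C lookup table folded byte-by-byte (4 table steps per word, data masked to 32 bits), keeping the 5 address bits as a bit loop; faster only by a constant factor if at all, so no speed claim.
import Mathlib
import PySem

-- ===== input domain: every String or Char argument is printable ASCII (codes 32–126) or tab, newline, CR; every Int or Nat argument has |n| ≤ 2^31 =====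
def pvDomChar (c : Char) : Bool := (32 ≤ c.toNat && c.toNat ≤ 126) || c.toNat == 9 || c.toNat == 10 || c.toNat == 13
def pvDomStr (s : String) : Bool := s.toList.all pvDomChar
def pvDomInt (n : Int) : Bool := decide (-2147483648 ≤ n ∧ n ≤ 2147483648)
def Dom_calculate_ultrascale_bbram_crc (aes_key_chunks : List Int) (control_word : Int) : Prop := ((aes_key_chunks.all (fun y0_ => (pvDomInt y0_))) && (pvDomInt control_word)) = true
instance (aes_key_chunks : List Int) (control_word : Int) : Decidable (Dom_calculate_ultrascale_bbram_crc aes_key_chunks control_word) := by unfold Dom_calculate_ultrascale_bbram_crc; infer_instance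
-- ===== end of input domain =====

-- B replaces A's 32 per-bit CRC iterations per data word by a precomputed 256-entry table folded
-- byte-by-byte (4 table steps per word); the 5 address bits keep a per-bit loop. Return value only.

-- ===== PORT A =====
-- one iteration of XilsKey's bit loop, on the (Crc, Value) pair
def pvBitStepA (p : Int × Int) : Int × Int :=
  (if PySem.Int.band (PySem.Int.bxor (PySem.Int.band p.2 1) p.1) 1 ≠ 0
     then PySem.Int.bxor (p.1 >>> (1:Nat)) 0x82F63B78
     else p.1 >>> (1:Nat),
   p.2 >>> (1:Nat))

def pvRowCrcA (PrevCRC Data Addr : Int) : Int :=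
  let s := (List.range 32).foldl (fun p _ => pvBitStepA p) (PrevCRC, Data)
  let t := (List.range 5).foldl (fun p _ => pvBitStepA p) (s.1, Addr)
  t.1

def calculate_ultrascale_bbram_crc (aes_key_chunks : List Int) (control_word : Int) : Int :=
  let crc := pvRowCrcA 0 control_word 9
  (List.range 8).foldl
    (fun crc i => pvRowCrcA crc (PySem.List.pyGetD aes_key_chunks (i : Int) 0) (8 - (i : Int))) crc

-- ===== PORT B =====
-- the 256-entry table: for each byte, 8 LSB-first steps of the >>1 ^ 0x82F63B78 recurrence
def pvCrcTable : List Int :=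
  (List.range 256).map (fun (b : Nat) =>
    (List.range 8).foldl
      (fun c _ => if PySem.Int.band c 1 ≠ 0 then PySem.Int.bxor (c >>> (1:Nat)) 0x82F63B78
                  else c >>> (1:Nat))
      (b : Int))

-- one iteration of the 5-bit address loop, on the (crc, row) pair
def pvBitStepB (p : Int × Int) : Int × Int :=
  (if PySem.Int.band (PySem.Int.bxor (PySem.Int.band p.2 1) p.1) 1 ≠ 0
     then PySem.Int.bxor (p.1 >>> (1:Nat)) 0x82F63B78
     else p.1 >>> (1:Nat),
   p.2 >>> (1:Nat))

def pvRowCrcB (prev_crc data addr : Int) : Int :=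
  let d := PySem.Int.mod data 0x100000000
  let crc := [0, 8, 16, 24].foldl
    (fun crc (shift : Nat) =>
      let byte := PySem.Int.band (d >>> shift) 255
      PySem.Int.bxor (crc >>> (8:Nat))
        (PySem.List.pyGetD pvCrcTable (PySem.Int.band (PySem.Int.bxor crc byte) 255) 0))
    prev_crc
  let t := (List.range 5).foldl (fun p _ => pvBitStepB p) (crc, addr)
  t.1

def calculate_ultrascale_bbram_crc_alt (aes_key_chunks : List Int) (control_word : Int) : Int :=
  let crc := pvRowCrcB 0 control_word 9
  (List.range 8).foldl
    (fun crc i => pvRowCrcB crc (PySem.List.pyGetD aes_key_chunks (i : Int) 0) (8 - (i : Int))) crc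

-- ===== PRECONDITION & SPEC =====
-- Pre_ excludes only inputs where A raises: aes_key_chunks[i] for i in range(8) is an IndexError when the list has fewer than 8 chunks.
def Pre_calculate_ultrascale_bbram_crc (aes_key_chunks : List Int) (control_word : Int) : Prop :=
  8 ≤ aes_key_chunks.length
instance (aes_key_chunks : List Int) (control_word : Int) : Decidable (Pre_calculate_ultrascale_bbram_crc aes_key_chunks control_word) := by unfold Pre_calculate_ultrascale_bbram_crc; infer_instance
def pvWitness_calculate_ultrascale_bbram_crc : List Int × Int := ([1, 2, 3, 4, 5, 6, 7, 8], 5)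

def Spec_calculate_ultrascale_bbram_crc (aes_key_chunks : List Int) (control_word : Int) (out : Int) : Prop := out = calculate_ultrascale_bbram_crc_alt aes_key_chunks control_word
instance (aes_key_chunks : List Int) (control_word : Int) (out : Int) : Decidable (Spec_calculate_ultrascale_bbram_crc aes_key_chunks control_word out) := by unfold Spec_calculate_ultrascale_bbram_crc; infer_instance

-- ===== CLAIM (what is proved, stated in full; the proofs are below) =====
def Claim_equal_calculate_ultrascale_bbram_crc : Prop := ∀ (aes_key_chunks : List Int) (control_word : Int), Dom_calculate_ultrascale_bbram_crc aes_key_chunks control_word → Pre_calculate_ultrascale_bbram_crc aes_key_chunks control_word → Spec_calculate_ultrascale_bbram_crc aes_key_chunks control_word (calculate_ultrascale_bbram_crc aes_key_chunks control_word)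

-- ===== LEMMAS AND PROOFS =====

-- Nat-level model of one bit-step, its n-fold iteration, and the byte step of the table algorithm
def pvStepN (c v : Nat) : Nat :=
  if ((v &&& 1) ^^^ c) &&& 1 ≠ 0 then (c >>> 1) ^^^ 0x82F63B78 else c >>> 1

def pvBitN : Nat → Nat → Nat → Nat
  | 0, c, _ => c
  | n + 1, c, v => pvBitN n (pvStepN c v) (v >>> 1)

def pvByteN (c b : Nat) : Nat := (c >>> 8) ^^^ pvBitN 8 ((c ^^^ b) &&& 255) 0

theorem pv_and1_ne (x : Nat) : (x &&& 1 ≠ 0) ↔ x.testBit 0 = true := by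
  simp [Nat.and_one_is_mod, Nat.testBit_zero]

theorem pv_shiftRight_xor (a b k : Nat) : (a ^^^ b) >>> k = (a >>> k) ^^^ (b >>> k) := by
  apply Nat.eq_of_testBit_eq; intro i
  simp [Nat.testBit_xor, Nat.testBit_shiftRight]

theorem pv_step_if (c v : Nat) :
    pvStepN c v = (c >>> 1) ^^^ (if (v.testBit 0 != c.testBit 0) = true then 0x82F63B78 else 0) := by
  unfold pvStepN
  have hbit : ((v &&& 1) ^^^ c).testBit 0 = (v.testBit 0 != c.testBit 0) := by
    simp [Nat.testBit_xor]
    rcases Nat.mod_two_eq_zero_or_one v with hv | hv <;>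
      rcases Nat.mod_two_eq_zero_or_one c with hc | hc <;>
      simp [Nat.add_mod, hv, hc]
  have key : (((v &&& 1) ^^^ c) &&& 1 ≠ 0) ↔ ((v.testBit 0 != c.testBit 0) = true) := by
    rw [pv_and1_ne, hbit]
  by_cases h : (v.testBit 0 != c.testBit 0) = true
  · rw [if_pos (key.mpr h), if_pos h]
  · rw [if_neg (fun hc => h (key.mp hc)), if_neg h, Nat.xor_zero]

theorem pv_step_lin (c1 v1 c2 v2 : Nat) :
    pvStepN (c1 ^^^ c2) (v1 ^^^ v2) = pvStepN c1 v1 ^^^ pvStepN c2 v2 := by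
  rw [pv_step_if, pv_step_if, pv_step_if, pv_shiftRight_xor]
  simp only [Nat.testBit_xor]
  rcases h1 : v1.testBit 0 <;> rcases h2 : c1.testBit 0 <;>
    rcases h3 : v2.testBit 0 <;> rcases h4 : c2.testBit 0 <;>
    simp [Nat.xor_assoc, Nat.xor_comm, Nat.xor_left_comm, Nat.xor_self]

theorem pv_bitN_lin : ∀ (n c1 v1 c2 v2 : Nat),
    pvBitN n (c1 ^^^ c2) (v1 ^^^ v2) = pvBitN n c1 v1 ^^^ pvBitN n c2 v2 := by
  intro n
  induction n with
  | zero => intro _ _ _ _; rfl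
  | succ n ih =>
    intro c1 v1 c2 v2
    show pvBitN n (pvStepN (c1 ^^^ c2) (v1 ^^^ v2)) ((v1 ^^^ v2) >>> 1) = _
    rw [pv_step_lin, pv_shiftRight_xor, ih]
    rfl

theorem pv_bitN_shift_only : ∀ (n c v : Nat),
    (∀ i, i < n → c.testBit i = v.testBit i) → pvBitN n c v = c >>> n := by
  intro n
  induction n with
  | zero => intro c v _; rfl
  | succ n ih =>
    intro c v h
    show pvBitN n (pvStepN c v) (v >>> 1) = _
    have h0 : c.testBit 0 = v.testBit 0 := h 0 (by omega)
    have hs : pvStepN c v = c >>> 1 := by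
      rw [pv_step_if, h0]; simp
    rw [hs, ih]
    · rw [← Nat.shiftRight_add]; congr 1; omega
    · intro i hi
      simp [Nat.testBit_shiftRight]
      exact h (1 + i) (by omega)

theorem pv_bitN_add : ∀ (a : Nat), ∀ (b c v : Nat),
    pvBitN (a + b) c v = pvBitN b (pvBitN a c v) (v >>> a) := by
  intro a
  induction a with
  | zero => intro b c v; simp [pvBitN]
  | succ a ih =>
    intro b c v
    have h1 : a + 1 + b = (a + b) + 1 := by omega
    rw [h1]
    show pvBitN (a + b) (pvStepN c v) (v >>> 1) = pvBitN b (pvBitN (a + 1) c v) (v >>> (a + 1))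
    rw [ih]
    show pvBitN b (pvBitN a (pvStepN c v) (v >>> 1)) ((v >>> 1) >>> a) = _
    congr 1
    rw [show a + 1 = 1 + a from by omega, Nat.shiftRight_add]

theorem pv_byte_eq (c v : Nat) : pvBitN 8 c v = pvByteN c (v &&& 255) := by
  have hmask : ((c ^^^ (v &&& 255)) &&& 255) = (c ^^^ v) &&& 255 := by
    apply Nat.eq_of_testBit_eq; intro i
    simp [Nat.testBit_xor, Nat.testBit_and]
    rcases h : Nat.testBit 255 i <;> simp
  unfold pvByteN
  rw [hmask]
  set t := (c ^^^ v) &&& 255 with ht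
  have ht255 : t ≤ 255 := Nat.and_le_right
  have hc : c = (c ^^^ t) ^^^ t := by rw [Nat.xor_assoc, Nat.xor_self, Nat.xor_zero]
  have hv : v = v ^^^ 0 := by rw [Nat.xor_zero]
  calc pvBitN 8 c v = pvBitN 8 ((c ^^^ t) ^^^ t) (v ^^^ 0) := by rw [← hc, ← hv]
    _ = pvBitN 8 (c ^^^ t) v ^^^ pvBitN 8 t 0 := pv_bitN_lin 8 _ _ _ _
    _ = ((c ^^^ t) >>> 8) ^^^ pvBitN 8 t 0 := by
        rw [pv_bitN_shift_only 8 (c ^^^ t) v ?_]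
        intro i hi
        have h255 : Nat.testBit 255 i = true := by
          have := Nat.testBit_two_pow_sub_one 8 i
          norm_num at this
          rw [this]; simp [hi]
        simp [ht, Nat.testBit_xor, Nat.testBit_and, h255]
    _ = (c >>> 8) ^^^ pvBitN 8 t 0 := by
        rw [pv_shiftRight_xor]
        have : t >>> 8 = 0 := by
          rw [Nat.shiftRight_eq_div_pow]
          apply Nat.div_eq_of_lt; omega
        rw [this, Nat.xor_zero]

theorem pv_core (c m : Nat) :
    pvBitN 32 c m =
      pvByteN (pvByteN (pvByteN (pvByteN c (m &&& 255)) ((m >>> 8) &&& 255)) ((m >>> 16) &&& 255))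
        ((m >>> 24) &&& 255) := by
  rw [show pvBitN 32 c m = pvBitN 24 (pvBitN 8 c m) (m >>> 8) from pv_bitN_add 8 24 c m]
  rw [show pvBitN 24 (pvBitN 8 c m) (m >>> 8)
        = pvBitN 16 (pvBitN 8 (pvBitN 8 c m) (m >>> 8)) ((m >>> 8) >>> 8)
      from pv_bitN_add 8 16 _ _]
  rw [show pvBitN 16 (pvBitN 8 (pvBitN 8 c m) (m >>> 8)) ((m >>> 8) >>> 8)
        = pvBitN 8 (pvBitN 8 (pvBitN 8 (pvBitN 8 c m) (m >>> 8)) ((m >>> 8) >>> 8)) (((m >>> 8) >>> 8) >>> 8)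
      from pv_bitN_add 8 8 _ _]
  rw [pv_byte_eq, pv_byte_eq, pv_byte_eq, pv_byte_eq]
  norm_num [← Nat.shiftRight_add]

-- bit agreement between an Int and its value taken mod 2^32
theorem pv_bit_agree (v : Int) (i : Nat) (hi : i < 32) :
    PySem.Int.band (v >>> i) 1 = ((((PySem.Int.mod v 4294967296).toNat >>> i) &&& 1 : Nat) : Int) := by
  have hpos : (0:Int) < 4294967296 := by norm_num
  have hr0 : 0 ≤ PySem.Int.mod v 4294967296 := PySem.Int.mod_nonneg v hpos
  set r := PySem.Int.mod v 4294967296 with hrdef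
  set q := PySem.Int.floordiv v 4294967296 with hqdef
  have hv : q * 4294967296 + r = v := PySem.Int.floordiv_mul_add_mod v 4294967296
  have hcast : ((r.toNat >>> i &&& 1 : Nat) : Int) = (r / 2 ^ i) % 2 := by
    push_cast [Nat.shiftRight_eq_div_pow, Nat.and_one_is_mod]
    rw [Int.toNat_of_nonneg hr0]
  rw [hcast, PySem.Int.band_one, PySem.Int.mod_eq_emod_of_pos (by norm_num : (0:Int) < 2),
      Int.shiftRight_eq_div_pow]
  push_cast
  have hsplit : (2:Int) ^ i * ((2:Int) ^ (31 - i) * 2) = 4294967296 := by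
    rw [show ((4294967296:Int)) = 2 ^ 32 from by norm_num, ← pow_succ, ← pow_add]
    congr 1; omega
  have hv' : v = r + q * 2 ^ (31 - i) * 2 * 2 ^ i := by
    rw [← hv, ← hsplit]; ring
  rw [hv', Int.add_mul_ediv_right _ _ (by positivity : (2:Int) ^ i ≠ 0)]
  rw [mul_comm (q * 2 ^ (31 - i)) 2, Int.add_mul_emod_self_left]

theorem pv_cast_shiftRight (m k : Nat) : ((m : Int)) >>> k = ((m >>> k : Nat) : Int) := by
  exact_mod_cast Int.natCast_shiftRight m k

theorem pv_bitstepA_cast (c m : Nat) (v : Int)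
    (h : PySem.Int.band v 1 = ((m &&& 1 : Nat) : Int)) :
    pvBitStepA ((c : Int), v) = (((pvStepN c m : Nat) : Int), v >>> (1:Nat)) := by
  unfold pvBitStepA pvStepN
  simp only [h]
  have hx : PySem.Int.bxor ((m &&& 1 : Nat) : Int) (c : Int) = (((m &&& 1) ^^^ c : Nat) : Int) :=
    PySem.Int.bxor_natCast _ _
  rw [hx]
  have hb : PySem.Int.band ((((m &&& 1) ^^^ c : Nat)) : Int) 1 = ((((m &&& 1) ^^^ c) &&& 1 : Nat) : Int) := by
    exact_mod_cast PySem.Int.band_natCast _ 1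
  rw [hb]
  by_cases hc : (((m &&& 1) ^^^ c) &&& 1 : Nat) ≠ 0
  · rw [if_pos (by exact_mod_cast hc), if_pos hc, pv_cast_shiftRight]
    have hx2 : PySem.Int.bxor (((c >>> 1 : Nat)) : Int) 2197175160 = (((c >>> 1) ^^^ 2197175160 : Nat) : Int) := by
      exact_mod_cast PySem.Int.bxor_natCast (c >>> 1) 2197175160
    rw [hx2]
  · rw [if_neg (by exact_mod_cast hc), if_neg hc, pv_cast_shiftRight]

theorem pv_afold : ∀ (k : Nat) (c : Nat) (v : Int) (m : Nat),
    (∀ i, i < k → PySem.Int.band (v >>> i) 1 = (((m >>> i) &&& 1 : Nat) : Int)) →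
    ((List.range k).foldl (fun p _ => pvBitStepA p) ((c : Int), v)).1 = ((pvBitN k c m : Nat) : Int) := by
  intro k
  induction k with
  | zero => intro c v m _; rfl
  | succ k ih =>
    intro c v m h
    rw [List.range_succ_eq_map]
    simp only [List.foldl_cons, List.foldl_map]
    have h0 : PySem.Int.band v 1 = ((m &&& 1 : Nat) : Int) := by
      have := h 0 (by omega)
      simpa using this
    rw [pv_bitstepA_cast c m v h0]
    show ((List.range k).foldl (fun p _ => pvBitStepA p) (((pvStepN c m : Nat) : Int), v >>> (1:Nat))).1
        = ((pvBitN (k+1) c m : Nat) : Int)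
    rw [ih (pvStepN c m) (v >>> (1:Nat)) (m >>> 1) ?_]
    · rfl
    · intro i hi
      have hs : (v >>> (1:Nat)) >>> i = v >>> (1 + i) := (Int.shiftRight_add v 1 i).symm
      rw [hs, ← Nat.shiftRight_add]
      exact h (1 + i) (by omega)

theorem pv_tstep_cast (x : Nat) :
    (if PySem.Int.band (x : Int) 1 ≠ 0 then PySem.Int.bxor (((x:Int)) >>> (1:Nat)) 0x82F63B78
     else ((x:Int)) >>> (1:Nat)) = ((pvStepN x 0 : Nat) : Int) := by
  have hs : pvStepN x 0 = if (x &&& 1 : Nat) ≠ 0 then (x >>> 1) ^^^ 0x82F63B78 else x >>> 1 := by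
    simp [pvStepN]
  rw [hs]
  have hb : PySem.Int.band (x : Int) 1 = ((x &&& 1 : Nat) : Int) := by
    exact_mod_cast PySem.Int.band_natCast x 1
  rw [hb]
  by_cases hc : (x &&& 1 : Nat) ≠ 0
  · rw [if_pos (by exact_mod_cast hc), if_pos hc, pv_cast_shiftRight]
    have hx2 : PySem.Int.bxor (((x >>> 1 : Nat)) : Int) 2197175160 = (((x >>> 1) ^^^ 2197175160 : Nat) : Int) := by
      exact_mod_cast PySem.Int.bxor_natCast (x >>> 1) 2197175160
    rw [hx2]
  · rw [if_neg (by exact_mod_cast hc), if_neg hc, pv_cast_shiftRight]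

theorem pv_tablefold : ∀ (k : Nat) (x : Nat),
    (List.range k).foldl
      (fun c _ => if PySem.Int.band c 1 ≠ 0 then PySem.Int.bxor (c >>> (1:Nat)) 0x82F63B78
                  else c >>> (1:Nat))
      ((x : Nat) : Int) = ((pvBitN k x 0 : Nat) : Int) := by
  intro k
  induction k with
  | zero => intro x; rfl
  | succ k ih =>
    intro x
    rw [List.range_succ_eq_map]
    simp only [List.foldl_cons, List.foldl_map]
    rw [pv_tstep_cast x, ih (pvStepN x 0)]
    show _ = ((pvBitN (k+1) x 0 : Nat) : Int)
    have : pvBitN (k+1) x 0 = pvBitN k (pvStepN x 0) 0 := by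
      show pvBitN k (pvStepN x 0) (0 >>> 1) = _
      norm_num
    rw [this]

theorem pv_table (j : Nat) (hj : j < 256) :
    PySem.List.pyGetD pvCrcTable (j : Int) 0 = ((pvBitN 8 j 0 : Nat) : Int) := by
  unfold pvCrcTable
  rw [PySem.List.pyGetD_natCast, PySem.List.getD_map_range _ _ _ _ hj, pv_tablefold 8 j]

theorem pv_bytestep_cast (cn bn : Nat) :
    PySem.Int.bxor (((cn : Nat) : Int) >>> (8:Nat))
        (PySem.List.pyGetD pvCrcTable (PySem.Int.band (PySem.Int.bxor ((cn:Nat) : Int) ((bn:Nat) : Int)) 255) 0)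
      = ((pvByteN cn bn : Nat) : Int) := by
  have hidx : PySem.Int.band (PySem.Int.bxor ((cn:Nat) : Int) ((bn:Nat) : Int)) 255
      = ((((cn ^^^ bn) &&& 255 : Nat)) : Int) := by
    rw [PySem.Int.bxor_natCast]
    exact_mod_cast PySem.Int.band_natCast (cn ^^^ bn) 255
  rw [hidx, pv_table _ (by have := Nat.and_le_right (n := cn ^^^ bn) (m := 255); omega),
      pv_cast_shiftRight]
  exact_mod_cast PySem.Int.bxor_natCast (cn >>> 8) (pvBitN 8 ((cn ^^^ bn) &&& 255) 0)

theorem pv_byte_cast (m s : Nat) :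
    PySem.Int.band (((m : Nat) : Int) >>> (s:Nat)) 255 = ((((m >>> s) &&& 255 : Nat)) : Int) := by
  rw [pv_cast_shiftRight]
  exact_mod_cast PySem.Int.band_natCast (m >>> s) 255

theorem pv_row_eq (c : Nat) (data addr : Int) :
    pvRowCrcA (c : Int) data addr = pvRowCrcB (c : Int) data addr := by
  have hm0 : 0 ≤ PySem.Int.mod data 4294967296 := PySem.Int.mod_nonneg data (by norm_num)
  set m : Nat := (PySem.Int.mod data 4294967296).toNat with hmdef
  have hd : PySem.Int.mod data 4294967296 = (m : Int) := (Int.toNat_of_nonneg hm0).symm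
  have hA : ((List.range 32).foldl (fun p _ => pvBitStepA p) ((c : Int), data)).1
      = ((pvBitN 32 c m : Nat) : Int) :=
    pv_afold 32 c data m (fun i hi => pv_bit_agree data i hi)
  have hAB : pvBitStepB = pvBitStepA := rfl
  simp only [pvRowCrcA, pvRowCrcB, hAB, hd, List.foldl_cons, List.foldl_nil]
  rw [hA, pv_byte_cast m 0, pv_bytestep_cast, pv_byte_cast m 8, pv_bytestep_cast,
      pv_byte_cast m 16, pv_bytestep_cast, pv_byte_cast m 24, pv_bytestep_cast]
  rw [pv_core c m]
  norm_num [Nat.shiftRight_zero]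

theorem pv_step_nonneg (p : Int × Int) (h : 0 ≤ p.1) : 0 ≤ (pvBitStepA p).1 := by
  unfold pvBitStepA
  have hsh : 0 ≤ p.1 >>> (1:Nat) := by
    rw [Int.shiftRight_eq_div_pow]
    exact Int.ediv_nonneg h (by positivity)
  by_cases hc : PySem.Int.band (PySem.Int.bxor (PySem.Int.band p.2 1) p.1) 1 ≠ 0
  · simp only [if_pos hc]
    rw [PySem.Int.bxor_of_nonneg hsh (by norm_num)]
    exact Int.natCast_nonneg _
  · simp only [if_neg hc]
    exact hsh

theorem pv_fold_nonneg (l : List Nat) (p : Int × Int) (h : 0 ≤ p.1) :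
    0 ≤ ((l.foldl (fun p _ => pvBitStepA p) p)).1 := by
  induction l generalizing p with
  | nil => exact h
  | cons a l ih => exact ih _ (pv_step_nonneg p h)

theorem pv_rowA_nonneg (c data addr : Int) (h : 0 ≤ c) : 0 ≤ pvRowCrcA c data addr := by
  unfold pvRowCrcA
  exact pv_fold_nonneg _ _ (pv_fold_nonneg _ _ h)

set_option maxHeartbeats 1000000 in
theorem pv_outer_fold (l : List Nat) (f g : Nat → Int) :
    ∀ (x : Int), 0 ≤ x →
      l.foldl (fun crc i => pvRowCrcA crc (f i) (g i)) x
        = l.foldl (fun crc i => pvRowCrcB crc (f i) (g i)) x := by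
  induction l with
  | nil => intro x _; rfl
  | cons a l ih =>
    intro x hx
    simp only [List.foldl_cons]
    have hrow : pvRowCrcA x (f a) (g a) = pvRowCrcB x (f a) (g a) := by
      rw [show x = ((x.toNat : Nat) : Int) from (Int.toNat_of_nonneg hx).symm]
      exact pv_row_eq x.toNat (f a) (g a)
    rw [← hrow]
    exact ih _ (pv_rowA_nonneg _ _ _ hx)

-- ===== VERDICT (by name: the statement is the Claim_ definition above) =====
set_option maxHeartbeats 1000000 in
theorem calculate_ultrascale_bbram_crc_spec : Claim_equal_calculate_ultrascale_bbram_crc := by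
  intro chunks cw _ _
  unfold Spec_calculate_ultrascale_bbram_crc
  simp only [calculate_ultrascale_bbram_crc, calculate_ultrascale_bbram_crc_alt]
  have h0 : pvRowCrcA 0 cw 9 = pvRowCrcB 0 cw 9 := by
    have h := pv_row_eq 0 cw 9
    rw [Nat.cast_zero] at h
    exact h
  rw [← h0]
  exact pv_outer_fold (List.range 8) (fun i => PySem.List.pyGetD chunks (i:Int) 0)
    (fun i => 8 - (i:Int)) (pvRowCrcA 0 cw 9) (pv_rowA_nonneg _ _ _ le_rfl)
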